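-- pv_equiv track=rewrite | github.com/raviputtar/pycharm_repo | euler54_pokerhands_optimized.py | count_card_of_same_value
-- ===== SOURCE A (Python) =====
-- def count_card_of_same_value(card_list):
--     ace_count = 0
--     two_count = 0
--     three_count = 0
--     four_count = 0
--     five_count = 0
--     six_count = 0
--     seven_count = 0
--     eight_count = 0
--     nine_count = 0
--     ten_count = 0
--     jack_count = 0
--     queen_count = 0
--     king_count = 0
--     for key in card_list:
--         if key == "A":
--             ace_count = ace_count + 1
--         if key == "2":
--             two_count = two_count + 1
--         if key == "3":
--             three_count = three_count + 1
--         if key == "4":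
--             four_count = four_count + 1
--         if key == "5":
--             five_count = five_count + 1
--         if key == "6":
--             six_count = six_count + 1
--         if key == "7":
--             seven_count = seven_count + 1
--         if key == "8":
--             eight_count = eight_count + 1
--         if key == "9":
--             nine_count = nine_count + 1
--         if key == "T":
--             ten_count = ten_count + 1
--         if key == "J":
--             jack_count = jack_count + 1
--         if key == "Q":
--             queen_count = queen_count + 1
--         if key == "K":
--             king_count = king_count + 1
--
--     myvalue_dict = dict()
--     myvalue_dict["A"] = ace_count
--     myvalue_dict["2"] = two_count
--     myvalue_dict["3"] = three_count
--     myvalue_dict["4"] = four_count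
--     myvalue_dict["5"] = five_count
--     myvalue_dict["6"] = six_count
--     myvalue_dict["7"] = seven_count
--     myvalue_dict["8"] = eight_count
--     myvalue_dict["9"] = nine_count
--     myvalue_dict["T"] = ten_count
--     myvalue_dict["J"] = jack_count
--     myvalue_dict["Q"] = queen_count
--     myvalue_dict["K"] = king_count
--
--     return myvalue_dict
-- ===== SOURCE B (Python) =====
-- def count_card_of_same_value(card_list):
--     cards = list(card_list)
--     return {v: cards.count(v) for v in "A23456789TJQK"}
-- ===== Notes on version B (the rewrite author's own statement) =====
-- stated objective: simpler
-- what changed: Replaces the 13-counter single-pass loop plus 13 explicit dict assignments with a dict comprehension over the fixed value string that computes each count by an independent list.count scan.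
import Mathlib
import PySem

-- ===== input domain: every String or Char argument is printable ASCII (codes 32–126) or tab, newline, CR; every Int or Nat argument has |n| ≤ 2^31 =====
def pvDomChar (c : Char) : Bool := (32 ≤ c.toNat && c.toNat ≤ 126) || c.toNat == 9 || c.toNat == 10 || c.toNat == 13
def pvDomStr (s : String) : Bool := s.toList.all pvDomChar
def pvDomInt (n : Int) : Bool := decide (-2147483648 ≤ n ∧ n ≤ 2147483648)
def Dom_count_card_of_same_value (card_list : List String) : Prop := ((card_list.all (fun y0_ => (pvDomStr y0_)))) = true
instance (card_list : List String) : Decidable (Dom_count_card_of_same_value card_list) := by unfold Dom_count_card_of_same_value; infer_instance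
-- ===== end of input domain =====

-- B replaces A's 13-counter single-pass loop and 13 dict assignments by a dict
-- comprehension over the fixed value string, one list.count scan per value (objective: simpler).

-- ===== PORT A =====
-- the 'for key in card_list' loop: 13 named counters threaded through the recursion
def countLoopA : List String → Int → Int → Int → Int → Int → Int → Int → Int → Int → Int → Int → Int → Int →
    Int × Int × Int × Int × Int × Int × Int × Int × Int × Int × Int × Int × Int
  | [], a, n2, n3, n4, n5, n6, n7, n8, n9, t, j, q, k => (a, n2, n3, n4, n5, n6, n7, n8, n9, t, j, q, k)
  | key :: rest, a, n2, n3, n4, n5, n6, n7, n8, n9, t, j, q, k =>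
    countLoopA rest
      (if key == "A" then a + 1 else a)
      (if key == "2" then n2 + 1 else n2)
      (if key == "3" then n3 + 1 else n3)
      (if key == "4" then n4 + 1 else n4)
      (if key == "5" then n5 + 1 else n5)
      (if key == "6" then n6 + 1 else n6)
      (if key == "7" then n7 + 1 else n7)
      (if key == "8" then n8 + 1 else n8)
      (if key == "9" then n9 + 1 else n9)
      (if key == "T" then t + 1 else t)
      (if key == "J" then j + 1 else j)
      (if key == "Q" then q + 1 else q)
      (if key == "K" then k + 1 else k)

def count_card_of_same_value (card_list : List String) : List (String × Int) :=
  match countLoopA card_list 0 0 0 0 0 0 0 0 0 0 0 0 0 with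
  | (a, n2, n3, n4, n5, n6, n7, n8, n9, t, j, q, k) =>
    (((((((((((((PySem.Dict.empty.insert "A" a).insert "2" n2).insert "3" n3).insert "4" n4).insert
      "5" n5).insert "6" n6).insert "7" n7).insert "8" n8).insert "9" n9).insert "T" t).insert
      "J" j).insert "Q" q).insert "K" k).items

-- ===== PORT B =====
def count_card_of_same_value_alt (card_list : List String) : List (String × Int) :=
  let cards := card_list
  ["A", "2", "3", "4", "5", "6", "7", "8", "9", "T", "J", "Q", "K"].map
    (fun v => (v, (PySem.List.count cards v : Int)))

-- ===== PRECONDITION & SPEC =====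
def Spec_count_card_of_same_value (card_list : List String) (out : List (String × Int)) : Prop := out = count_card_of_same_value_alt card_list
instance (card_list : List String) (out : List (String × Int)) : Decidable (Spec_count_card_of_same_value card_list out) := by unfold Spec_count_card_of_same_value; infer_instance

-- ===== CLAIM (what is proved, stated in full; the proofs are below) =====
def Claim_equal_count_card_of_same_value : Prop := ∀ (card_list : List String), Dom_count_card_of_same_value card_list → Spec_count_card_of_same_value card_list (count_card_of_same_value card_list)

-- ===== LEMMAS AND PROOFS =====
theorem countLoopA_eq (cs : List String) (a n2 n3 n4 n5 n6 n7 n8 n9 t j q k : Int) :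
    countLoopA cs a n2 n3 n4 n5 n6 n7 n8 n9 t j q k =
      (a + cs.count "A", n2 + cs.count "2", n3 + cs.count "3", n4 + cs.count "4",
       n5 + cs.count "5", n6 + cs.count "6", n7 + cs.count "7", n8 + cs.count "8",
       n9 + cs.count "9", t + cs.count "T", j + cs.count "J", q + cs.count "Q",
       k + cs.count "K") := by
  induction cs generalizing a n2 n3 n4 n5 n6 n7 n8 n9 t j q k with
  | nil => simp [countLoopA]
  | cons x rest ih =>
    simp only [countLoopA, ih, List.count_cons]
    refine Prod.ext ?_ (Prod.ext ?_ (Prod.ext ?_ (Prod.ext ?_ (Prod.ext ?_ (Prod.ext ?_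
      (Prod.ext ?_ (Prod.ext ?_ (Prod.ext ?_ (Prod.ext ?_ (Prod.ext ?_ (Prod.ext ?_ ?_))))))))))) <;>
      simp only [] <;> split_ifs <;> push_cast <;> ring

-- ===== VERDICT (by name: the statement is the Claim_ definition above) =====
theorem count_card_of_same_value_spec : Claim_equal_count_card_of_same_value := by
  intro cs _
  unfold Spec_count_card_of_same_value count_card_of_same_value count_card_of_same_value_alt
  rw [countLoopA_eq]
  simp [PySem.List.count_eq, PySem.Dict.items_insert, PySem.Dict.contains_insert, PySem.Dict.empty]
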